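-- pv_equiv track=rewrite | github.com/Ruchi2613/Leetcode | 2025/January/30/problems.py | solve
-- ===== SOURCE A (Python) =====
-- def solve(nums):
--     stack = []
--     curres = 0
--     res = 0
--     for num in nums:
--         curl = 1
--         while stack and stack[-1][0] >= num - curl:
--             prev, l = stack.pop()
--             curl = min(curl+l, num)
--             curres -= (prev + prev - l + 1)*l//2
--         stack.append((num, curl))
--         curres += (num + num - curl + 1)*curl//2
--         res = max(res, curres)
--     return res
-- ===== SOURCE B (Python) =====
-- def solve(nums):
--     res = 0
--     prev = []            # elements seen so far, most recent first
--     for x in nums: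
--         total = x
--         cur = x
--         for p in prev:
--             v = min(p, cur - 1)
--             if v < 1:
--                 break
--             total += v
--             cur = v
--         res = max(res, total)
--         prev = [x] + prev
--     return res
-- ===== Notes on version B (the rewrite author's own statement) =====
-- stated objective: simpler
-- what changed: Replaces A's amortized monotonic stack of run-length-encoded (value, length) arithmetic-series segments with incremental series-sum bookkeeping by a plain per-element backward rescan: for each element, walk the previous elements right-to-left taking v = min(prev, cur-1) until it drops below 1, and keep the maximum total.
-- outside the precondition, e.g. on solve([-3, 2]): A returns 0, B returns 2; on solve([0, -3, 2]): A returns 5, B returns 2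
import Mathlib
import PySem

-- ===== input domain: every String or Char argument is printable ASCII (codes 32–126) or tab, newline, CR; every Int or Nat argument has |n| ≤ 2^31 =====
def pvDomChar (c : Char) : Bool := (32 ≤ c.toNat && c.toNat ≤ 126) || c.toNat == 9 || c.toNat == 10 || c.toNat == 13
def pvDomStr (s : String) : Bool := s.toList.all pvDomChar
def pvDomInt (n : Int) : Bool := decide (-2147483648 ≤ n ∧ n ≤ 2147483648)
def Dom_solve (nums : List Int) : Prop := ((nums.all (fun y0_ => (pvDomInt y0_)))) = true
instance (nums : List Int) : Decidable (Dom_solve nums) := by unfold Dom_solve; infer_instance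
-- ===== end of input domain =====

-- B replaces A's amortized monotonic stack of run-length-encoded arithmetic series by a plain
-- per-element backward rescan of the previous elements (objective: simpler; not faster).

-- ===== PORT A =====
-- the inner `while stack and stack[-1][0] >= num - curl` loop; stack head = Python's stack[-1]
def solveWhile : List (Int × Int) → Int → Int → Int → List (Int × Int) × Int × Int
  | [], _, curl, curres => ([], curl, curres)
  | (prev, l) :: rest, num, curl, curres =>
    if num - curl ≤ prev then
      solveWhile rest num (min (curl + l) num)
        (curres - PySem.Int.floordiv ((prev + prev - l + 1) * l) 2)
    else ((prev, l) :: rest, curl, curres)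

-- one iteration of A's `for num in nums` loop over the state (stack, curres, res)
def solveStep (st : List (Int × Int) × Int × Int) (num : Int) : List (Int × Int) × Int × Int :=
  let w := solveWhile st.1 num 1 st.2.1
  let curres := w.2.2 + PySem.Int.floordiv ((num + num - w.2.1 + 1) * w.2.1) 2
  ((num, w.2.1) :: w.1, curres, max st.2.2 curres)

def solve (nums : List Int) : Int := (nums.foldl solveStep ([], 0, 0)).2.2

-- ===== PORT B =====
-- B's inner loop (`for p in prev: v = min(p, cur-1); if v < 1: break; total += v; cur = v`),
-- returning the amount added to total
def chainSum : List Int → Int → Int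
  | [], _ => 0
  | p :: rest, cur =>
    if min p (cur - 1) < 1 then 0 else min p (cur - 1) + chainSum rest (min p (cur - 1))

-- one iteration of B's outer loop over the state (res, prev)
def bstep (st : Int × List Int) (x : Int) : Int × List Int :=
  (max st.1 (x + chainSum st.2 x), x :: st.2)

def solve_alt (nums : List Int) : Int := (nums.foldl bstep (0, [])).1

-- ===== PRECONDITION & SPEC =====
-- Pre_ admits the function's natural domain (LeetCode 2355: all shelf counts are ≥ 0), plus all
-- lists of length ≤ 1, where the two programs agree regardless of sign; it excludes longer lists
-- with a negative element, on which A's run-length/series bookkeeping produces accidental values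
-- (it can push runs of negative length), which B does not reproduce.
def Pre_solve (nums : List Int) : Prop := nums.length ≤ 1 ∨ ∀ x ∈ nums, 0 ≤ x
instance (nums : List Int) : Decidable (Pre_solve nums) := by unfold Pre_solve; infer_instance

def pvWitness_solve : List Int := ([3, 0, 4, 2])

def Spec_solve (nums : List Int) (out : Int) : Prop := out = solve_alt nums
instance (nums : List Int) (out : Int) : Decidable (Spec_solve nums out) := by unfold Spec_solve; infer_instance

-- ===== CLAIM (what is proved, stated in full; the proofs are below) =====
def Claim_equal_solve : Prop := ∀ (nums : List Int), Dom_solve nums → Pre_solve nums → Spec_solve nums (solve nums)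

-- ===== LEMMAS AND PROOFS =====

-- the list of values B's inner loop adds (chainSum is its sum)
def pchain : List Int → Int → List Int
  | [], _ => []
  | p :: rest, cur =>
    if min p (cur - 1) < 1 then [] else min p (cur - 1) :: pchain rest (min p (cur - 1))

-- the k values n, n-1, …, n-k+1
def descList (n : Int) (k : Nat) : List Int := (List.range k).map fun i => n - (i : Int)

-- the values stored in A's stack (top first); runs with top ≤ 0 store nothing
def decode (s : List (Int × Int)) : List Int :=
  s.flatMap fun nl => if nl.1 ≤ 0 then [] else descList nl.1 nl.2.toNat

-- well-formedness of a stack entry: a genuine run ending at a value ≥ 1, or an inert zero run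
def goodRun (nl : Int × Int) : Prop := (1 ≤ nl.2 ∧ 1 ≤ nl.1 - nl.2 + 1) ∨ (nl.1 = 0 ∧ (nl.2 = 0 ∨ nl.2 = 1))

def topLe (b : Int) : List (Int × Int) → Prop
  | [] => True
  | nl :: _ => nl.1 ≤ b

def good : List (Int × Int) → Prop
  | [] => True
  | nl :: rest => goodRun nl ∧ topLe (nl.1 - nl.2) rest ∧ good rest

-- strictly descending, all ≥ 1, all ≤ b
def sdpos : Int → List Int → Prop
  | _, [] => True
  | b, v :: t => 1 ≤ v ∧ v ≤ b ∧ sdpos (v - 1) t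

-- the loop invariant tying A's state to the processed prefix revp (most recent first)
def AInv (revp : List Int) (stack : List (Int × Int)) (curres : Int) : Prop :=
  good stack ∧ (∀ cur, pchain (decode stack) cur = pchain revp cur) ∧ curres = (decode stack).sum

lemma chainSum_eq (l : List Int) : ∀ cur, chainSum l cur = (pchain l cur).sum := by
  induction l with
  | nil => intro cur; simp [chainSum, pchain]
  | cons p rest ih =>
    intro cur
    simp only [chainSum, pchain]
    split
    · simp
    · simp [ih]

lemma descList_succ_last (n : Int) (k : Nat) : descList n (k + 1) = descList n k ++ [n - k] := by
  simp [descList, List.range_succ]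

lemma descList_succ_head (n : Int) (k : Nat) : descList n (k + 1) = n :: descList (n - 1) k := by
  induction k generalizing n with
  | zero => simp [descList, List.range_succ]
  | succ k ih =>
    rw [descList_succ_last, ih, descList_succ_last]
    simp only [List.cons_append, List.cons.injEq, true_and]
    congr 2
    push_cast; omega

lemma descList_append (n : Int) (a b : Nat) :
    descList n (a + b) = descList n a ++ descList (n - a) b := by
  induction a generalizing n with
  | zero => simp [descList]
  | succ a ih =>
    have h1 : a + 1 + b = (a + b) + 1 := by omega
    have h2 : n - 1 - (a : Int) = n - ((a + 1 : Nat) : Int) := by push_cast; ring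
    rw [h1, descList_succ_head, ih, descList_succ_head, h2]
    simp

lemma descList_sum (n : Int) (k : Nat) : 2 * (descList n k).sum = (n + n - k + 1) * k := by
  induction k with
  | zero => simp [descList]
  | succ k ih =>
    rw [descList_succ_last]
    simp only [List.sum_append, List.sum_cons, List.sum_nil]
    push_cast
    push_cast at ih
    nlinarith [ih]

lemma seriesVal (n l : Int) (hl : 0 ≤ l) :
    PySem.Int.floordiv ((n + n - l + 1) * l) 2 = (descList n l.toNat).sum := by
  have h1 : (n + n - l + 1) * l = 2 * (descList n l.toNat).sum := by
    rw [descList_sum]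
    have : ((l.toNat : Int)) = l := Int.toNat_of_nonneg hl
    rw [this]
  rw [h1, PySem.Int.floordiv_eq_ediv_of_pos (by norm_num)]
  omega

lemma runSum (p l : Int) (h : goodRun (p, l)) :
    PySem.Int.floordiv ((p + p - l + 1) * l) 2
      = (if p ≤ 0 then ([] : List Int) else descList p l.toNat).sum := by
  rcases h with ⟨h1, h2⟩ | ⟨h1, h2⟩
  · rw [if_neg (by omega), seriesVal p l (by omega)]
  · subst h1
    rcases h2 with h | h <;> subst h <;> simp [PySem.Int.floordiv]

lemma sdpos_mono {b b' : Int} {v : List Int} (h : sdpos b v) (hb : b ≤ b') : sdpos b' v := by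
  cases v with
  | nil => trivial
  | cons x t => obtain ⟨a, b, c⟩ := h; exact ⟨a, by omega, c⟩

lemma sdpos_desc_append (n : Int) (k : Nat) (b : Int) (W : List Int)
    (h1 : 1 ≤ n - k + 1) (h2 : n ≤ b) (h3 : sdpos (n - k) W) :
    sdpos b (descList n k ++ W) := by
  induction k generalizing n b with
  | zero => simpa [descList] using sdpos_mono h3 (by omega)
  | succ k ih =>
    rw [descList_succ_head]
    refine ⟨by push_cast at h1; omega, h2, ?_⟩
    exact ih (n - 1) (n - 1) (by push_cast at h1 ⊢; omega) le_rfl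
      (sdpos_mono h3 (by push_cast; omega))

lemma good_decode : ∀ (s : List (Int × Int)) (b : Int), good s → topLe b s → 0 ≤ b →
    sdpos b (decode s) := by
  intro s
  induction s with
  | nil => intro b _ _ _; trivial
  | cons nl rest ih =>
    intro b hg ht hb
    obtain ⟨hr, hadj, hgr⟩ := hg
    obtain ⟨n, l⟩ := nl
    simp only [decode, List.flatMap_cons] at *
    rcases hr with ⟨h1, h2⟩ | ⟨h1, h2⟩
    · rw [if_neg (by omega)]
      apply sdpos_desc_append n l.toNat b _ (by rw [Int.toNat_of_nonneg (by omega)]; omega)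
        (by exact ht) ?_
      have : ((l.toNat : Int)) = l := Int.toNat_of_nonneg (by omega)
      rw [this]
      exact ih (n - l) hgr hadj (by omega)
    · subst h1
      rw [if_pos le_rfl]
      simp only [List.nil_append]
      cases rest with
      | nil => trivial
      | cons nl2 rest2 =>
        -- top of rest ≤ 0 - l ≤ 0; if l = 1 the top would be ≤ -1, impossible for a good run
        obtain ⟨hr2, hadj2, hgr2⟩ := hgr
        simp only [topLe] at hadj
        rcases h2 with h | h <;> subst h
        · exact sdpos_mono (ih 0 ⟨hr2, hadj2, hgr2⟩ (by simp [topLe]; omega) le_rfl) hb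
        · rcases hr2 with ⟨a1, a2⟩ | ⟨a1, a2⟩ <;> omega

lemma pchain_stop_le_zero (V : List Int) (cur : Int) (h : cur ≤ 1) : pchain V cur = [] := by
  cases V with
  | nil => rfl
  | cons p rest => simp only [pchain]; rw [if_pos (by omega)]

lemma pchain_fix : ∀ (V : List Int) (cur : Int), sdpos (cur - 1) V → pchain V cur = V := by
  intro V
  induction V with
  | nil => intro cur _; rfl
  | cons v t ih =>
    intro cur h
    obtain ⟨hv1, hv2, hv3⟩ := h
    simp only [pchain]
    rw [min_eq_left (by omega), if_neg (by omega), ih v (by simpa using hv3)]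

lemma pchain_pchain : ∀ (V : List Int) (x v : Int), v ≤ x →
    pchain (pchain V x) v = pchain V v := by
  intro V
  induction V with
  | nil => intro x v _; rfl
  | cons r rest ih =>
    intro x v hvx
    simp only [pchain]
    by_cases hc : min r (x - 1) < 1
    · rw [if_pos hc]
      have : min r (v - 1) < 1 := by omega
      rw [if_pos this]
      rfl
    · rw [if_neg hc]
      simp only [pchain]
      by_cases hw : min r (v - 1) < 1
      · rw [if_pos hw, if_pos (by omega)]
      · rw [if_neg hw, if_neg (by omega)]
        have h1 : min (min r (x - 1)) (v - 1) = min r (v - 1) := by omega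
        rw [h1, ih (min r (x-1)) (min r (v-1)) (by omega)]

lemma chain_cap : ∀ (k : Nat) (p cur : Int) (T : List Int), cur - 1 ≤ p → (k : Int) ≤ cur - 1 →
    pchain (descList p k ++ T) cur = descList (cur - 1) k ++ pchain T (cur - k) := by
  intro k
  induction k with
  | zero => intro p cur T _ _; simp [descList]
  | succ k ih =>
    intro p cur T h1 h2
    rw [descList_succ_head, descList_succ_head]
    simp only [List.cons_append, pchain]
    push_cast at h2
    rw [min_eq_right (by omega), if_neg (by omega)]
    rw [ih (p - 1) (cur - 1) T (by omega) (by omega)]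
    have hc : cur - 1 - (k : Int) = cur - ((k + 1 : Nat) : Int) := by push_cast; ring
    rw [hc]

lemma chain_cap_stop : ∀ (k : Nat) (p cur : Int) (T : List Int), cur - 1 ≤ p → cur ≤ (k : Int) →
    1 ≤ cur → pchain (descList p k ++ T) cur = descList (cur - 1) (cur - 1).toNat := by
  intro k
  induction k with
  | zero => intro p cur T _ h2 h3; omega
  | succ k ih =>
    intro p cur T h1 h2 h3
    rw [descList_succ_head]
    simp only [List.cons_append, pchain]
    by_cases hc : cur = 1
    · subst hc
      rw [if_pos (by omega)]
      simp [descList]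
    · rw [min_eq_right (by omega), if_neg (by omega)]
      push_cast at h2
      rw [ih (p - 1) (cur - 1) T (by omega) (by omega) (by omega)]
      have : (cur - 1).toNat = (cur - 1 - 1).toNat + 1 := by omega
      rw [this, descList_succ_head]

lemma whileSpec (num : Int) (hnum : 1 ≤ num) :
    ∀ (stack : List (Int × Int)) (c curres : Int), good stack → 1 ≤ c → c ≤ num →
    1 ≤ (solveWhile stack num c curres).2.1 ∧
    (solveWhile stack num c curres).2.1 ≤ num ∧
    topLe (num - (solveWhile stack num c curres).2.1) (solveWhile stack num c curres).1 ∧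
    good (solveWhile stack num c curres).1 ∧
    descList (num - 1) ((solveWhile stack num c curres).2.1 - 1).toNat
        ++ decode (solveWhile stack num c curres).1
      = descList (num - 1) (c - 1).toNat ++ pchain (decode stack) (num - c + 1) ∧
    (solveWhile stack num c curres).2.2
      = curres - (decode stack).sum + (decode (solveWhile stack num c curres).1).sum := by
  intro stack
  induction stack with
  | nil =>
    intro c curres _ hc1 hc2
    simp only [solveWhile]
    refine ⟨hc1, hc2, trivial, trivial, by simp [decode, pchain], by simp [decode]⟩
  | cons nl rest ih =>
    intro c curres hg hc1 hc2
    obtain ⟨p, l⟩ := nl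
    obtain ⟨hr, hadj, hgr⟩ := hg
    have hl0 : 0 ≤ l := by rcases hr with ⟨a, b⟩ | ⟨a, b⟩ <;> omega
    have hp0 : 0 ≤ p := by rcases hr with ⟨a, b⟩ | ⟨a, b⟩ <;> omega
    have hdec : decode ((p, l) :: rest)
        = (if p ≤ 0 then [] else descList p l.toNat) ++ decode rest := by
      simp [decode]
    by_cases hcond : num - c ≤ p
    · -- the run is popped
      simp only [solveWhile, if_pos hcond]
      obtain ⟨i1, i2, i3, i4, i5, i6⟩ :=
        ih (min (c + l) num) (curres - PySem.Int.floordiv ((p + p - l + 1) * l) 2) hgr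
          (by omega) (by omega)
      refine ⟨i1, i2, i3, i4, ?_, ?_⟩
      · rw [i5, hdec]
        rcases hr with ⟨h1, h2⟩ | ⟨h1, h2⟩
        · -- genuine run
          rw [if_neg (by omega)]
          have hlcast : ((l.toNat : Nat) : Int) = l := Int.toNat_of_nonneg hl0
          by_cases hcl : c + l ≤ num
          · -- the run is consumed without hitting the floor 1
            rw [chain_cap l.toNat p (num - c + 1) (decode rest) (by omega) (by omega)]
            have e0 : num - c + 1 - 1 = num - c := by ring
            rw [e0]
            have hmin : min (c + l) num = c + l := by omega
            rw [hmin]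
            have e1 : (c + l - 1).toNat = (c - 1).toNat + l.toNat := by omega
            rw [e1, descList_append]
            have e2 : num - 1 - ((c - 1).toNat : Int) = num - c := by omega
            have e3 : num - c + 1 - (l.toNat : Int) = num - (c + l) + 1 := by omega
            rw [e2, e3, List.append_assoc]
          · -- the run hits the floor 1; everything below is popped as well
            rw [chain_cap_stop l.toNat p (num - c + 1) (decode rest) (by omega) (by omega)
              (by omega)]
            have hmin : min (c + l) num = num := by omega
            rw [hmin]
            have e1 : num - c + 1 - 1 = num - c := by omega
            rw [e1]
            have e2 : (num - 1).toNat = (c - 1).toNat + (num - c).toNat := by omega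
            rw [e2, descList_append]
            have e3 : num - 1 - ((c - 1).toNat : Int) = num - c := by omega
            rw [e3, pchain_stop_le_zero _ _ (by omega)]
            simp
        · -- inert zero run: p = 0 forces c = num
          subst h1
          rw [if_pos le_rfl]
          have hc : c = num := by omega
          have hmin : min (c + l) num = c := by omega
          rw [hmin]
          simp
      · rw [i6, hdec, List.sum_append, runSum p l hr]
        ring
    · -- the loop stops
      simp only [solveWhile, if_neg hcond]
      refine ⟨hc1, hc2, by simp [topLe]; omega, ⟨hr, hadj, hgr⟩, ?_, by ring⟩
      have hfix : pchain (decode ((p, l) :: rest)) (num - c + 1) = decode ((p, l) :: rest) := by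
        apply pchain_fix
        have : sdpos (num - c - 1) (decode ((p, l) :: rest)) :=
          good_decode _ _ ⟨hr, hadj, hgr⟩ (by simp [topLe]; omega) (by omega)
        exact sdpos_mono this (by omega)
      rw [hfix]

lemma whileZero : ∀ (stack : List (Int × Int)) (c curres : Int), good stack → 0 ≤ c →
    solveWhile stack 0 c curres
      = ([], if stack.isEmpty then c else 0, curres - (decode stack).sum) := by
  intro stack
  induction stack with
  | nil => intro c curres _ _; simp [solveWhile, decode]
  | cons nl rest ih =>
    intro c curres hg hc
    obtain ⟨p, l⟩ := nl
    obtain ⟨hr, hadj, hgr⟩ := hg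
    have hl0 : 0 ≤ l := by rcases hr with ⟨a, b⟩ | ⟨a, b⟩ <;> omega
    have hp0 : 0 ≤ p := by rcases hr with ⟨a, b⟩ | ⟨a, b⟩ <;> omega
    simp only [solveWhile, if_pos (by omega : (0 : Int) - c ≤ p)]
    rw [ih (min (c + l) 0) _ hgr (by omega)]
    have hmin : min (c + l) 0 = 0 := by omega
    have hdec : decode ((p, l) :: rest)
        = (if p ≤ 0 then [] else descList p l.toNat) ++ decode rest := by simp [decode]
    rw [hdec, List.sum_append, runSum p l hr, hmin]
    refine Prod.ext rfl (Prod.ext ?_ ?_)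
    · simp
    · simp only []
      ring

lemma pchain_cons_zero (revp : List Int) (cur : Int) : pchain (0 :: revp) cur = [] := by
  simp only [pchain]; rw [if_pos (by omega)]

lemma stepLemma (num : Int) (hnum : 0 ≤ num) (revp : List Int) (stack : List (Int × Int))
    (curres res : Int) (h : AInv revp stack curres) :
    AInv (num :: revp) (solveStep (stack, curres, res) num).1 (solveStep (stack, curres, res) num).2.1 ∧
    (solveStep (stack, curres, res) num).2.1 = num + chainSum revp num ∧
    (solveStep (stack, curres, res) num).2.2 = max res (num + chainSum revp num) := by
  obtain ⟨hgood, hch, hsum⟩ := h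
  by_cases hz : num = 0
  · subst hz
    simp only [solveStep]
    rw [whileZero stack 1 curres hgood (by omega)]
    have hbt : chainSum revp 0 = 0 := by
      rw [chainSum_eq, pchain_stop_le_zero _ _ (by omega)]; rfl
    have hcr : (curres - (decode stack).sum)
        + PySem.Int.floordiv ((0 + 0 - (if stack.isEmpty then (1:Int) else 0) + 1)
            * (if stack.isEmpty then (1:Int) else 0)) 2 = 0 := by
      split <;> simp [PySem.Int.floordiv] <;> omega
    refine ⟨⟨?_, ?_, ?_⟩, ?_, ?_⟩
    · exact ⟨Or.inr ⟨rfl, by split; exact Or.inr rfl; exact Or.inl rfl⟩, trivial, trivial⟩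
    · intro cur
      rw [pchain_cons_zero]
      simp [decode, pchain]
    · simp only [decode, List.flatMap_cons, List.flatMap_nil]
      rw [if_pos le_rfl]
      simpa using hcr
    · simpa [hbt] using hcr
    · simpa [hbt] using congrArg (max res) hcr
  · have hnum1 : 1 ≤ num := by omega
    obtain ⟨i1, i2, i3, i4, i5, i6⟩ := whileSpec num hnum1 stack 1 curres hgood le_rfl hnum1
    simp only [solveStep]
    have hcnat : (solveWhile stack num 1 curres).2.1.toNat
        = ((solveWhile stack num 1 curres).2.1 - 1).toNat + 1 := by omega
    have hi5 : descList (num - 1) ((solveWhile stack num 1 curres).2.1 - 1).toNat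
        ++ decode (solveWhile stack num 1 curres).1 = pchain (decode stack) num := by
      have e1 : ((1 : Int) - 1).toNat = 0 := by omega
      have e2 : num - 1 + 1 = num := by ring
      rw [e1, e2] at i5
      simpa [descList] using i5
    have hKey : decode ((num, (solveWhile stack num 1 curres).2.1)
          :: (solveWhile stack num 1 curres).1)
        = num :: pchain (decode stack) num := by
      simp only [decode, List.flatMap_cons]
      rw [if_neg (by omega)]
      rw [hcnat, descList_succ_head]
      simp only [List.cons_append]
      rw [show (List.flatMap (fun nl : Int × Int => if nl.1 ≤ 0 then [] else descList nl.1 nl.2.toNat)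
            (solveWhile stack num 1 curres).1) = decode (solveWhile stack num 1 curres).1 from rfl]
      rw [hi5]
      rfl
    have hcr : (solveWhile stack num 1 curres).2.2
        + PySem.Int.floordiv ((num + num - (solveWhile stack num 1 curres).2.1 + 1)
            * (solveWhile stack num 1 curres).2.1) 2
        = (num :: pchain (decode stack) num).sum := by
      have hsum0 : curres - (decode stack).sum = 0 := by omega
      rw [seriesVal _ _ (by omega), i6, hsum0, ← hi5, hcnat, descList_succ_head]
      simp only [List.sum_cons, List.sum_append]
      ring
    have hBtot : num + chainSum revp num = (num :: pchain (decode stack) num).sum := by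
      rw [chainSum_eq, ← hch num]
      simp
    refine ⟨⟨⟨Or.inl ⟨i1, by omega⟩, i3, i4⟩, ?_, ?_⟩, ?_, ?_⟩
    · intro cur
      rw [hKey]
      simp only [pchain]
      by_cases hb : min num (cur - 1) < 1
      · rw [if_pos hb, if_pos hb]
      · rw [if_neg hb, if_neg hb]
        congr 1
        rw [pchain_pchain _ num _ (by omega), hch]
    · rw [hKey]
      exact hcr
    · rw [hcr, hBtot]
    · rw [congrArg (max res) (hcr.trans hBtot.symm)]

lemma mainLoop : ∀ (nums revp : List Int) (stack : List (Int × Int)) (curres r : Int),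
    (∀ x ∈ nums, 0 ≤ x) → AInv revp stack curres →
    (nums.foldl solveStep (stack, curres, r)).2.2 = (nums.foldl bstep (r, revp)).1 := by
  intro nums
  induction nums with
  | nil => intro revp stack curres r _ _; rfl
  | cons num rest ih =>
    intro revp stack curres r hpre hinv
    simp only [List.foldl_cons]
    obtain ⟨I1, I2, I3⟩ := stepLemma num (hpre num List.mem_cons_self) revp stack curres r hinv
    have hstep : solveStep (stack, curres, r) num
        = ((solveStep (stack, curres, r) num).1, (solveStep (stack, curres, r) num).2.1,
           (solveStep (stack, curres, r) num).2.2) := rfl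
    have hb : bstep (r, revp) num = (max r (num + chainSum revp num), num :: revp) := rfl
    rw [hstep, I3, hb]
    exact ih (num :: revp) _ _ _ (fun x hx => hpre x (List.mem_cons_of_mem _ hx)) I1

-- ===== VERDICT (by name: the statement is the Claim_ definition above) =====
theorem solve_spec : Claim_equal_solve := by
  intro nums _ hpre
  unfold Spec_solve solve solve_alt
  rcases hpre with hlen | hpos
  · match nums, hlen with
    | [], _ => rfl
    | [x], _ =>
      show (solveStep ([], 0, 0) x).2.2 = (bstep (0, []) x).1
      simp only [solveStep, solveWhile, bstep, chainSum]
      rw [seriesVal x 1 (by omega)]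
      simp [descList, List.range_succ]
  · exact mainLoop nums [] [] 0 0 hpos ⟨trivial, fun _ => rfl, rfl⟩
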